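-- pv_equiv track=rewrite | github.com/JordiCarreraVentura/assignment | TransformerPipeline.py | summarize_csv
-- ===== SOURCE A (Python) =====
-- def summarize_csv(rows, columns):
--     keys = list(rows[0])
--     rows = rows[1:]
--     out = [columns]
--     for row in rows:
--         _row = [row[keys.index(col)] for col in columns]
--         out.append(_row)
--     return out
-- ===== SOURCE B (Python) =====
-- def summarize_csv(rows, columns):
--     keys = list(rows[0])
--     idxs = [keys.index(col) for col in columns]
--     body = rows[1:]
--     cols_data = [[row[i] for row in body] for i in idxs]
--     return [columns] + [[c[j] for c in cols_data] for j in range(len(body))]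
-- ===== Notes on version B (the rewrite author's own statement) =====
-- stated objective: alternative
-- what changed: B resolves all column indices up front, extracts each selected column as a whole (column-major pass over the data), and then transposes the extracted columns back into rows, instead of A's row-major per-row list comprehension that recomputes keys.index(col) for every row.
-- outside the precondition, e.g. on summarize_csv([[]], ['']): A returns [['']], B raises ValueError; on summarize_csv([['a']], ['x']): A returns [['x']], B raises ValueError
import Mathlib
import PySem

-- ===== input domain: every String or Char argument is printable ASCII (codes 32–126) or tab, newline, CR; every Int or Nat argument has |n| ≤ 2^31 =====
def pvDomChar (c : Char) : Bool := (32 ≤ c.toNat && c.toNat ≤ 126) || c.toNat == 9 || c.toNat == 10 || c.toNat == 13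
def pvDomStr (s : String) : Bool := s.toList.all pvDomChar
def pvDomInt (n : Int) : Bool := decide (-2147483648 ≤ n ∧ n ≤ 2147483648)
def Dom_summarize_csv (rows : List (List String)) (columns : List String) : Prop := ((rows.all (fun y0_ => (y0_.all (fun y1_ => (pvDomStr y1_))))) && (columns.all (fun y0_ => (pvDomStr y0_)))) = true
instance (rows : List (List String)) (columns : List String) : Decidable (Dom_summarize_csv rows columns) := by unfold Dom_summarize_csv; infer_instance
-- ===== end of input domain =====

-- B resolves all column indices up front, extracts each selected column whole, then transposes
-- the extracted columns back into rows, instead of A's row-major per-row selection; objective: alternative.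

-- ===== PORT A =====
-- A: keys = rows[0]; for each data row build [row[keys.index(col)] for col in columns], appending to out.
def summarize_csv (rows : List (List String)) (columns : List String) : List (List String) :=
  let keys := (PySem.List.pyGet? rows 0).getD []            -- list(rows[0]); none (IndexError) excluded by Pre_
  let data := PySem.List.slice rows (some 1) none           -- rows[1:]
  data.foldl
    (fun out row =>
      out ++ [columns.map (fun col =>
        ((PySem.List.index? keys col).bind
          (fun i => PySem.List.pyGet? row (i : Int))).getD "")])   -- row[keys.index(col)]; ValueError/IndexError excluded by Pre_
    [columns]

-- ===== PORT B =====
-- B: idxs = [keys.index(col) for col in columns]; cols_data = each selected column pulled out of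
-- the body as a whole list; the result rows are read off by transposing cols_data with an index loop.
def summarize_csv_alt (rows : List (List String)) (columns : List String) : List (List String) :=
  let keys := (PySem.List.pyGet? rows 0).getD []            -- list(rows[0])
  let idxs : List Nat := columns.map (fun col => (PySem.List.index? keys col).getD 0)  -- ValueError excluded by Pre_
  let body := PySem.List.slice rows (some 1) none           -- rows[1:]
  let colsData := idxs.map (fun (i : Nat) =>
    body.map (fun row => (PySem.List.pyGet? row (i : Int)).getD ""))  -- [[row[i] for row in body] for i in idxs]
  columns :: (List.range body.length).map (fun (j : Nat) =>
    colsData.map (fun c => (PySem.List.pyGet? c (j : Int)).getD ""))  -- [[c[j] for c in cols_data] for j in range(len(body))]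

-- ===== PRECONDITION & SPEC =====
-- Pre_ excludes the inputs where A raises (empty rows: IndexError; a column missing from the
-- header with data rows present: ValueError; a ragged data row: IndexError) and the header-only
-- inputs with a column missing from the header, where A's returning [columns] without ever
-- validating the columns is an accident of its per-row lookup and B naturally raises ValueError.
def Pre_summarize_csv (rows : List (List String)) (columns : List String) : Prop :=
  rows ≠ [] ∧ ∀ col ∈ columns, col ∈ rows.headD [] ∧
    ∀ row ∈ rows.tail, (rows.headD []).idxOf col < row.length
instance (rows : List (List String)) (columns : List String) : Decidable (Pre_summarize_csv rows columns) := by unfold Pre_summarize_csv; infer_instance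

def pvWitness_summarize_csv : List (List String) × List String :=
  ([["a", "b"], ["1", "2"], ["3", "4"]], ["b", "a"])

def Spec_summarize_csv (rows : List (List String)) (columns : List String) (out : List (List String)) : Prop := out = summarize_csv_alt rows columns
instance (rows : List (List String)) (columns : List String) (out : List (List String)) : Decidable (Spec_summarize_csv rows columns out) := by unfold Spec_summarize_csv; infer_instance

-- ===== CLAIM (what is proved, stated in full; the proofs are below) =====
def Claim_equal_summarize_csv : Prop := ∀ (rows : List (List String)) (columns : List String), Dom_summarize_csv rows columns → Pre_summarize_csv rows columns → Spec_summarize_csv rows columns (summarize_csv rows columns)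

-- ===== LEMMAS AND PROOFS =====

theorem idxOf?_of_mem (l : List String) (a : String) (h : a ∈ l) :
    l.idxOf? a = some (l.idxOf a) := by
  induction l with
  | nil => simp at h
  | cons b t ih =>
    by_cases hb : b = a
    · subst hb; simp [List.idxOf?_cons]
    · have ht : a ∈ t := by simpa [hb, Ne.symm hb] using h
      simp [List.idxOf?_cons, hb, ih ht]

theorem index?_of_mem (l : List String) (a : String) (h : a ∈ l) :
    PySem.List.index? l a = some (l.idxOf a) := by
  rw [PySem.List.index?_eq_idxOf?]; exact idxOf?_of_mem l a h

-- A's row loop: appending one mapped row per data row is [columns] ++ map.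
theorem foldl_append_map (f : List String → List String) :
    ∀ (l : List (List String)) (a : List (List String)),
      l.foldl (fun out row => out ++ [f row]) a = a ++ l.map f := by
  intro l
  induction l with
  | nil => simp
  | cons x t ih => intro a; simp [List.foldl_cons, ih, List.append_assoc]

-- B's column-extract-then-transpose, on a cons, is a row-major map: reading index j of each
-- extracted column reproduces row j's selection.
theorem alt_cons (k : List String) (rs : List (List String)) (columns : List String) :
    summarize_csv_alt (k :: rs) columns
    = columns :: rs.map (fun row => columns.map (fun col =>
        (PySem.List.pyGet? row (((PySem.List.index? k col).getD 0 : Nat) : Int)).getD "")) := by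
  unfold summarize_csv_alt
  simp only [PySem.List.pyGet?_zero_cons, Option.getD_some, PySem.List.slice_from_one,
    List.map_map]
  refine congrArg (columns :: ·) ?_
  apply List.ext_getElem
  · simp
  · intro j h1 h2
    simp only [List.getElem_map, List.getElem_range, PySem.List.pyGet?_natCast]
    apply List.map_congr_left
    intro col _
    have hj : j < rs.length := by simpa using h2
    simp [Function.comp, List.getElem?_map, List.getElem?_eq_getElem hj]

theorem summarize_csv_spec : Claim_equal_summarize_csv := by
  intro rows columns _hdom hpre
  unfold Spec_summarize_csv
  obtain ⟨hne, hcols⟩ := hpre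
  cases rows with
  | nil => exact absurd rfl hne
  | cons k rs =>
    rw [alt_cons]
    unfold summarize_csv
    simp only [PySem.List.pyGet?_zero_cons, Option.getD_some, PySem.List.slice_from_one]
    rw [foldl_append_map]
    simp only [List.cons_append, List.nil_append]
    refine congrArg (columns :: ·) ?_
    apply List.map_congr_left
    intro row hrow
    apply List.map_congr_left
    intro col hcol
    obtain ⟨hmem, hlen⟩ := hcols col hcol
    simp only [List.headD_cons, List.tail_cons] at hmem hlen
    rw [index?_of_mem k col hmem]
    simp
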